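-- pv_equiv track=rewrite | github.com/MAmonenkoFedor/atom_ai_b | apps/access/seed.py | _iter_summary
-- ===== SOURCE A (Python) =====
-- from typing import Iterable
--
-- def _iter_summary(items: Iterable[tuple[str, bool]]) -> tuple[int, int]:
--     created = updated = 0
--     for _code, is_created in items:
--         if is_created:
--             created += 1
--         else:
--             updated += 1
--     return created, updated
-- ===== SOURCE B (Python) =====
-- def _iter_summary(items):
--     def go(seg):
--         if not seg:
--             return (0, 0)
--         if len(seg) == 1:
--             _code, is_created = seg[0]
--             return (1, 0) if is_created else (0, 1)
--         mid = len(seg) // 2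
--         c1, u1 = go(seg[:mid])
--         c2, u2 = go(seg[mid:])
--         return (c1 + c2, u1 + u2)
--     return go(list(items))
-- ===== Notes on version B (the rewrite author's own statement) =====
-- stated objective: alternative
-- what changed: B replaces A's single sequential pass with two parallel accumulators by a divide-and-conquer recursion: it splits the list in half, recursively summarises each half, and adds the resulting pairs.
import Mathlib
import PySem

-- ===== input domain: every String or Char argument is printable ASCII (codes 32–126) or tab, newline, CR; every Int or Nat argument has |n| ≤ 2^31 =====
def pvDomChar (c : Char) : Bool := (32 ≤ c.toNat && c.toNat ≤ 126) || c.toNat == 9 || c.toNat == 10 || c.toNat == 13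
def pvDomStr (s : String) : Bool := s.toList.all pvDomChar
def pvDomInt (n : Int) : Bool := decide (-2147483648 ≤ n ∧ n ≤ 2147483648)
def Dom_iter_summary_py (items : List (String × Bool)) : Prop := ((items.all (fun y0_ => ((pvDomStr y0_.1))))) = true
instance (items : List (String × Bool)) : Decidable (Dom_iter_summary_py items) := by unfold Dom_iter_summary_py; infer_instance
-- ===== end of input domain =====

-- B summarises by divide and conquer (split in half, recurse, add the pairs) instead of A's sequential two-counter loop; same O(n) cost, different algorithmic structure.

-- ===== PORT A =====
-- explicit loop carrying (created, updated), branching on the flag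
def iter_summary_py (items : List (String × Bool)) : Int × Int :=
  items.foldl (fun (acc : Int × Int) it =>
    if it.2 then (acc.1 + 1, acc.2) else (acc.1, acc.2 + 1)) (0, 0)

-- ===== PORT B =====
-- divide-and-conquer: empty/singleton base cases, otherwise split at the midpoint and add the two summaries
def iterSummaryGo : List (String × Bool) → Int × Int
  | [] => (0, 0)
  | [it] => if it.2 then (1, 0) else (0, 1)
  | a :: b :: rest =>
      let seg := a :: b :: rest
      let mid := seg.length / 2
      let l := iterSummaryGo (seg.take mid)
      let r := iterSummaryGo (seg.drop mid)
      (l.1 + r.1, l.2 + r.2)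
termination_by seg => seg.length
decreasing_by
  · simp [List.length_take]; omega
  · simp [List.length_drop]; omega

def iter_summary_py_alt (items : List (String × Bool)) : Int × Int :=
  iterSummaryGo items

-- ===== PRECONDITION & SPEC =====
def Spec_iter_summary_py (items : List (String × Bool)) (out : Int × Int) : Prop := out = iter_summary_py_alt items
instance (items : List (String × Bool)) (out : Int × Int) : Decidable (Spec_iter_summary_py items out) := by unfold Spec_iter_summary_py; infer_instance

-- ===== CLAIM (what is proved, stated in full; the proofs are below) =====
def Claim_equal_iter_summary_py : Prop := ∀ (items : List (String × Bool)), Dom_iter_summary_py items → Spec_iter_summary_py items (iter_summary_py items)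

-- ===== LEMMAS AND PROOFS =====
-- A's loop, started from any (c, u), adds (number of true flags, number of false flags)
theorem iter_summary_foldl_shift (items : List (String × Bool)) (c u : Int) :
    items.foldl (fun (acc : Int × Int) it =>
      if it.2 then (acc.1 + 1, acc.2) else (acc.1, acc.2 + 1)) (c, u)
    = (c + ((items.filter (fun it => it.2)).length : Int),
       u + ((items.length : Int) - ((items.filter (fun it => it.2)).length : Int))) := by
  induction items generalizing c u with
  | nil => simp
  | cons hd tl ih =>
    by_cases h : hd.2 <;> simp [List.foldl, h, ih] <;> push_cast <;> omega

-- B's divide-and-conquer computes the same closed form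
theorem iterSummaryGo_eq (seg : List (String × Bool)) :
    iterSummaryGo seg
    = (((seg.filter (fun it => it.2)).length : Int),
       (seg.length : Int) - ((seg.filter (fun it => it.2)).length : Int)) := by
  induction seg using iterSummaryGo.induct with
  | case1 => simp [iterSummaryGo]
  | case2 it h => simp [iterSummaryGo, h]
  | case3 it h => simp [iterSummaryGo, h]
  | case4 a b rest seg mid ihl ihr =>
    rw [iterSummaryGo]
    rw [ihl, ihr]
    have hsplit : ((a :: b :: rest).take ((a :: b :: rest).length / 2))
        ++ ((a :: b :: rest).drop ((a :: b :: rest).length / 2)) = a :: b :: rest :=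
      List.take_append_drop _ _
    have hf := congrArg (fun l => ((l.filter (fun it : String × Bool => it.2)).length : Int)) hsplit
    have hl := congrArg (fun l : List (String × Bool) => (l.length : Int)) hsplit
    simp only [List.filter_append, List.length_append, Nat.cast_add] at hf hl
    rw [Prod.mk.injEq]
    constructor
    · rw [← hf]
    · rw [← hf, ← hl]; ring

-- ===== VERDICT (by name: the statement is the Claim_ definition above) =====
theorem iter_summary_py_spec : Claim_equal_iter_summary_py := by
  intro items _
  unfold Spec_iter_summary_py iter_summary_py iter_summary_py_alt
  rw [iter_summary_foldl_shift, iterSummaryGo_eq]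
  simp
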